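-- pv_equiv track=rewrite | github.com/Luzvader/TradAI-Telegrambot | broker/trading212.py | _clean_ticker
-- ===== SOURCE A (Python) =====
-- _SUFFIX_TO_MARKET: dict[str, str] = {
--     "_US_EQ": "NASDAQ",
--     "_ES_EQ": "IBEX",
--     "_UK_EQ": "LSE",
--     "_DE_EQ": "XETRA",
--     "_FR_EQ": "EURONEXT",
--     "_NL_EQ": "EURONEXT_AMSTERDAM",
--     "_IT_EQ": "BORSA_ITALIANA",
--     "_PT_EQ": "BOLSA_LISBOA",
-- }
--
-- def _clean_ticker(raw: str) -> str:
--     """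
--     Limpia ticker de Trading212 a formato estándar.
--     Ej: "AAPL_US_EQ" → "AAPL", "SAN_ES_EQ" → "SAN"
--     """
--     if not raw:
--         return raw
--     for suffix in _SUFFIX_TO_MARKET:
--         if raw.endswith(suffix):
--             return raw[: -len(suffix)]
--     if raw.endswith("_EQ"):
--         return raw[:-3]
--     if "_" in raw:
--         return raw.split("_")[0]
--     return raw
-- ===== SOURCE B (Python) =====
-- _SUFFIX_TO_MARKET: dict[str, str] = {
--     "_US_EQ": "NASDAQ",
--     "_ES_EQ": "IBEX",
--     "_UK_EQ": "LSE",
--     "_DE_EQ": "XETRA",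
--     "_FR_EQ": "EURONEXT",
--     "_NL_EQ": "EURONEXT_AMSTERDAM",
--     "_IT_EQ": "BORSA_ITALIANA",
--     "_PT_EQ": "BOLSA_LISBOA",
-- }
--
-- _TAILS = tuple("_" + s[1:3] for s in _SUFFIX_TO_MARKET)  # ("_US", "_ES", ...)
--
-- def _clean_ticker(raw: str) -> str:
--     if not raw:
--         return raw
--     if raw.endswith("_EQ"):
--         body = raw[:-3]
--         return body[:-3] if body[-3:] in _TAILS else body
--     if "_" in raw:
--         return raw.split("_")[0]
--     return raw
-- ===== Notes on version B (the rewrite author's own statement) =====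
-- stated objective: simpler
-- what changed: Instead of looping over the eight six-character market suffixes with endswith, B strips the three-character equity suffix once and decides between the specific strip (to the prefix) and the generic three-character strip by one membership test of the last three characters of the remainder among the eight market tails.
import Mathlib
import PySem

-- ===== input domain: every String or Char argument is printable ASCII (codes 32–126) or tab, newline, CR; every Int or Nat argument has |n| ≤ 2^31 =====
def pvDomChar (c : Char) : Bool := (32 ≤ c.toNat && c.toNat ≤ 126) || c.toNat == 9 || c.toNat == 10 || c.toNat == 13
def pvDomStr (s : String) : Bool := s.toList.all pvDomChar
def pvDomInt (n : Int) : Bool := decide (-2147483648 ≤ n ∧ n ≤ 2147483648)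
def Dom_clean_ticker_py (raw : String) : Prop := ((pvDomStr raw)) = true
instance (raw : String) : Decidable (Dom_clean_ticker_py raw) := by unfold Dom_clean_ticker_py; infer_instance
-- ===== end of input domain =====

-- B replaces A's loop over the eight six-character suffixes by one '_EQ' strip plus a single
-- membership test of the last three characters among the eight '_XX' market tails (objective: simpler).

-- ===== PORT A =====
-- keys of _SUFFIX_TO_MARKET in insertion order (the loop uses only the keys)
def pvSuffixes : List String := ["_US_EQ", "_ES_EQ", "_UK_EQ", "_DE_EQ", "_FR_EQ", "_NL_EQ", "_IT_EQ", "_PT_EQ"]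

-- 'for suffix in _SUFFIX_TO_MARKET: if raw.endswith(suffix): return raw[:-len(suffix)]'
def pvLoopA (raw : String) : List String → Option String
  | [] => none
  | sfx :: rest =>
      if PySem.Str.endswith raw sfx then
        some (PySem.Str.slice raw none (some (-(PySem.Str.len sfx : Int))))
      else pvLoopA raw rest

def clean_ticker_py (raw : String) : String :=
  if raw = "" then raw
  else
    match pvLoopA raw pvSuffixes with
    | some r => r
    | none =>
      if PySem.Str.endswith raw "_EQ" then PySem.Str.slice raw none (some (-3))
      else if PySem.Str.isIn "_" raw then ((PySem.Str.split? raw "_").getD []).headD ""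
      else raw

-- ===== PORT B =====
-- _TAILS = ("_US", "_ES", ...)
def pvTails : List String := ["_US", "_ES", "_UK", "_DE", "_FR", "_NL", "_IT", "_PT"]

def clean_ticker_py_alt (raw : String) : String :=
  if raw = "" then raw
  else if PySem.Str.endswith raw "_EQ" then
    let body := PySem.Str.slice raw none (some (-3))
    if PySem.Str.slice body (some (-3)) none ∈ pvTails then
      PySem.Str.slice body none (some (-3))
    else body
  else if PySem.Str.isIn "_" raw then ((PySem.Str.split? raw "_").getD []).headD ""
  else raw

-- ===== PRECONDITION & SPEC =====
def Spec_clean_ticker_py (raw : String) (out : String) : Prop := out = clean_ticker_py_alt raw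
instance (raw : String) (out : String) : Decidable (Spec_clean_ticker_py raw out) := by unfold Spec_clean_ticker_py; infer_instance

-- ===== CLAIM (what is proved, stated in full; the proofs are below) =====
def Claim_equal_clean_ticker_py : Prop := ∀ (raw : String), Dom_clean_ticker_py raw → Spec_clean_ticker_py raw (clean_ticker_py raw)

-- ===== LEMMAS AND PROOFS =====

-- the eight (tail, suffix) pairs: pvSuffixes = pvPairs.map Prod.snd, pvTails = pvPairs.map Prod.fst
def pvPairs : List (String × String) :=
  [("_US","_US_EQ"),("_ES","_ES_EQ"),("_UK","_UK_EQ"),("_DE","_DE_EQ"),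
   ("_FR","_FR_EQ"),("_NL","_NL_EQ"),("_IT","_IT_EQ"),("_PT","_PT_EQ")]

theorem pv_endswith_iff (s p : String) : PySem.Str.endswith s p = true ↔ p.toList <:+ s.toList := by
  simp [PySem.Chars.endswith_iff]

theorem pv_suffix_iff_drop (t m : List Char) : t <:+ m ↔ m.drop (m.length - t.length) = t := by
  constructor
  · rintro ⟨r, rfl⟩
    have h : (r ++ t).length - t.length = r.length := by simp
    rw [h, List.drop_left]
  · intro h; rw [← h]; exact List.drop_suffix _ _

theorem pv_append_suffix_cancel (a m c : List Char) : (a ++ c) <:+ (m ++ c) ↔ a <:+ m := by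
  constructor
  · rintro ⟨r, h⟩
    rw [← List.append_assoc] at h
    exact ⟨r, List.append_cancel_right h⟩
  · rintro ⟨r, rfl⟩
    exact ⟨r, by simp⟩

theorem pv_he (raw : String) (m : List Char) (hm : m ++ "_EQ".toList = raw.toList)
    (t sfx : String) (ht : t.toList.length = 3) (hs : sfx.toList = t.toList ++ "_EQ".toList) :
    (PySem.Str.endswith raw sfx = true ↔ m.drop (m.length - 3) = t.toList) := by
  rw [pv_endswith_iff, hs, ← hm, pv_append_suffix_cancel, pv_suffix_iff_drop, ht]

theorem pv_loop_aux (raw : String) (m : List Char) (hm : m ++ "_EQ".toList = raw.toList)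
    (ps : List (String × String))
    (hgood : ∀ p ∈ ps, p.1.toList.length = 3 ∧ p.2.toList = p.1.toList ++ "_EQ".toList ∧ PySem.Str.len p.2 = 6) :
    pvLoopA raw (ps.map Prod.snd) =
      if (∃ p ∈ ps, m.drop (m.length - 3) = p.1.toList) then
        some (PySem.Str.slice raw none (some (-6))) else none := by
  induction ps with
  | nil => simp [pvLoopA]
  | cons p rest ih =>
    obtain ⟨h3, hsf, hlen⟩ := hgood p (by simp)
    have he := pv_he raw m hm p.1 p.2 h3 hsf
    simp only [List.map_cons, pvLoopA]
    by_cases hd : m.drop (m.length - 3) = p.1.toList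
    · rw [if_pos (he.mpr hd), if_pos ⟨p, by simp, hd⟩, hlen]
    · rw [if_neg (fun hx => hd (he.mp hx)), ih (fun q hq => hgood q (by simp [hq]))]
      by_cases hx : ∃ q ∈ rest, m.drop (m.length - 3) = q.1.toList
      · rw [if_pos hx, if_pos]
        obtain ⟨q, hq, hh⟩ := hx; exact ⟨q, by simp [hq], hh⟩
      · rw [if_neg hx, if_neg]
        rintro ⟨q, hq, hh⟩
        simp only [List.mem_cons] at hq
        rcases hq with rfl | hq
        · exact hd hh
        · exact hx ⟨q, hq, hh⟩

theorem pv_loop_none (raw : String) (l : List String)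
    (hl : ∀ sfx ∈ l, PySem.Str.endswith raw sfx = false) : pvLoopA raw l = none := by
  induction l with
  | nil => rfl
  | cons s rest ih =>
    simp only [pvLoopA]
    rw [if_neg (show ¬ _ = true by intro hx; rw [hl s (by simp)] at hx; exact Bool.false_ne_true hx)]
    exact ih (fun x hx => hl x (by simp [hx]))

theorem pv_slice_to3 (s : String) :
    (PySem.Str.slice s none (some (-3))).toList = s.toList.take (s.toList.length - 3) := by
  simp [PySem.Str.toList_slice]
  rw [PySem.List.slice_to_neg_ofNat _ 3 (by omega)]
  simp [String.length_toList]

theorem pv_slice_from3 (s : String) :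
    (PySem.Str.slice s (some (-3)) none).toList = s.toList.drop (s.toList.length - 3) := by
  simp [PySem.Str.toList_slice, String.length_toList]
  rw [PySem.List.slice_from_neg_ofNat _ 3 (by omega)]
  simp [String.length_toList]

theorem pv_slice_to6 (s : String) :
    (PySem.Str.slice s none (some (-6))).toList = s.toList.take (s.toList.length - 6) := by
  simp [PySem.Str.toList_slice]
  rw [PySem.List.slice_to_neg_ofNat _ 6 (by omega)]
  simp [String.length_toList]

-- ===== VERDICT (by name: the statement is the Claim_ definition above) =====
theorem clean_ticker_py_spec : Claim_equal_clean_ticker_py := by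
  intro raw _
  unfold Spec_clean_ticker_py clean_ticker_py clean_ticker_py_alt
  by_cases h0 : raw = ""
  · rw [if_pos h0, if_pos h0]
  · rw [if_neg h0, if_neg h0]
    by_cases hEQ : PySem.Str.endswith raw "_EQ" = true
    · -- raw ends with "_EQ"
      obtain ⟨m, hm⟩ := (pv_endswith_iff raw "_EQ").mp hEQ
      have hgood : ∀ p ∈ pvPairs,
          p.1.toList.length = 3 ∧ p.2.toList = p.1.toList ++ "_EQ".toList ∧ PySem.Str.len p.2 = 6 := by
        decide
      have hmap : pvSuffixes = pvPairs.map Prod.snd := by rfl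
      rw [hmap, pv_loop_aux raw m hm pvPairs hgood]
      have hbody : (PySem.Str.slice raw none (some (-3))).toList = m := by
        rw [pv_slice_to3, ← hm]
        simp
      have hdB : (PySem.Str.slice (PySem.Str.slice raw none (some (-3))) (some (-3)) none).toList
          = m.drop (m.length - 3) := by
        rw [pv_slice_from3, hbody]
      have hmem_iff : (PySem.Str.slice (PySem.Str.slice raw none (some (-3))) (some (-3)) none ∈ pvTails)
          ↔ ∃ p ∈ pvPairs, m.drop (m.length - 3) = p.1.toList := by
        rw [← hdB]
        simp only [pvTails, pvPairs, List.mem_cons, List.not_mem_nil, or_false,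
          ← String.toList_inj]
        constructor
        · rintro (h | h | h | h | h | h | h | h) <;> simp_all
        · rintro ⟨p, hp, h⟩
          rcases hp with rfl | rfl | rfl | rfl | rfl | rfl | rfl | rfl <;> simp_all
      by_cases hx : ∃ p ∈ pvPairs, m.drop (m.length - 3) = p.1.toList
      · rw [if_pos hx]
        show PySem.Str.slice raw none (some (-6)) = _
        rw [if_pos hEQ, if_pos (hmem_iff.mpr hx)]
        obtain ⟨p, hp, hdt⟩ := hx
        have h3 : p.1.toList.length = 3 := (hgood p hp).1
        have hm3 : 3 ≤ m.length := by
          have hlen := congrArg List.length hdt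
          simp only [List.length_drop, h3] at hlen
          omega
        apply String.toList_inj.mp
        rw [pv_slice_to6, pv_slice_to3, hbody, ← hm]
        have hlraw : (m ++ "_EQ".toList).length = m.length + 3 := by simp
        rw [hlraw, List.take_append_of_le_length (by omega)]
        congr 1
      · rw [if_neg hx]
        show (if PySem.Str.endswith raw "_EQ" then PySem.Str.slice raw none (some (-3))
              else if PySem.Str.isIn "_" raw then ((PySem.Str.split? raw "_").getD []).headD ""
              else raw) = _
        rw [if_pos hEQ, if_pos hEQ, if_neg (fun hc => hx (hmem_iff.mp hc))]
    · -- raw does not end with "_EQ": no six-character suffix can match either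
      rw [if_neg hEQ]
      have hsf : ∀ sfx ∈ pvSuffixes, PySem.Str.endswith raw sfx = false := by
        intro sfx hmem
        rw [Bool.eq_false_iff]
        intro hne
        have h1 : sfx.toList <:+ raw.toList := (pv_endswith_iff raw sfx).mp hne
        have h2 : "_EQ".toList <:+ sfx.toList := by
          fin_cases hmem <;> decide
        exact hEQ ((pv_endswith_iff raw "_EQ").mpr (h2.trans h1))
      rw [pv_loop_none raw pvSuffixes hsf]
      show (if PySem.Str.isIn "_" raw then ((PySem.Str.split? raw "_").getD []).headD ""
            else raw) = _
      rw [if_neg hEQ]
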